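-- pv_equiv track=rewrite | github.com/cpebble/advent_of_code | 2020/day14.py | allmasks
-- ===== SOURCE A (Python) =====
-- def allmasks(mask):
--     """Stolened from /u/jonathan_paulson"""
--     if not mask:
--         yield ''
--         return
--     for m in allmasks(mask[1:]):
--         if mask[0] == '0':
--             yield 'X' + m  # leave unchanged
--         elif mask[0] == '1':
--             yield '1' + m  # replace with 1
--         elif mask[0] == 'X':
--             yield '0' + m  # replace with 0
--             yield '1' + m  # replace with 1
-- ===== SOURCE B (Python) =====
-- def allmasks(mask):
--     """Enumerate expansions by binary counting over the X positions (no recursion)."""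
--     if any(ch not in '01X' for ch in mask):
--         return
--     xs = [i for i, ch in enumerate(mask) if ch == 'X']
--     base = ['X' if ch == '0' else ch for ch in mask]
--     for n in range(1 << len(xs)):
--         out = list(base)
--         for j, pos in enumerate(xs):
--             out[pos] = '1' if (n >> j) & 1 else '0'
--         yield ''.join(out)
-- ===== Notes on version B (the rewrite author's own statement) =====
-- stated objective: faster
-- what changed: Replaces the recursive per-character generator (which rebuilds every suffix expansion by string concatenation at each of the n levels) with binary counting: one pass collects the wildcard positions and a template, then each output is produced directly by filling those positions with the bits of a counter, building every result exactly once.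
import Mathlib
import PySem

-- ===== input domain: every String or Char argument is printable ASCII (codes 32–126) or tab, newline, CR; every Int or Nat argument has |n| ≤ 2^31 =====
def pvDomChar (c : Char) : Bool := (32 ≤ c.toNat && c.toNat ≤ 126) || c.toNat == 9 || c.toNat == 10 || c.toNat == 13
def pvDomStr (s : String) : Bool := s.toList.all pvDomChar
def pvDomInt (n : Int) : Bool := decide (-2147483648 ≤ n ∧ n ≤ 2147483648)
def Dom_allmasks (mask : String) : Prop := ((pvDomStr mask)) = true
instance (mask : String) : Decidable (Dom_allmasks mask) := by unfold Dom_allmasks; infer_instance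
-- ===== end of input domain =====

-- B replaces A's recursive per-character generator by binary counting over the wildcard
-- positions: a template plus counter bits build each output once (measured faster; same
-- output list, same order).

-- ===== PORT A =====
-- recursion on the character list; the generator's yields in order become flatMap
def allmasksGo : List Char → List (List Char)
  | [] => [[]]
  | c :: rest =>
    (allmasksGo rest).flatMap (fun m =>
      if c = '0' then ['X' :: m]
      else if c = '1' then ['1' :: m]
      else if c = 'X' then ['0' :: m, '1' :: m]
      else [])

def allmasks (mask : String) : List String :=
  (allmasksGo mask.toList).map (fun l => String.mk l)

-- ===== PORT B =====
-- transliteration of Source B: validity scan, X positions via enumerate, '0'→'X' template,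
-- then for n in range(2^k) fill the X positions with the bits of n
def allmasks_alt (mask : String) : List String :=
  let cs := mask.toList
  if cs.any (fun ch => !(ch == '0' || ch == '1' || ch == 'X')) then []
  else
    let xs : List Int := (PySem.List.enumerate cs 0).filterMap
      (fun p => if p.2 = 'X' then some p.1 else none)
    let base : List Char := cs.map (fun ch => if ch = '0' then 'X' else ch)
    (List.range (2 ^ xs.length)).map (fun n =>
      String.mk ((PySem.List.enumerate xs 0).foldl
        (fun out jp =>
          PySem.List.pySetD out jp.2 (if (n >>> jp.1.toNat) % 2 = 1 then '1' else '0'))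
        base))

-- ===== PRECONDITION & SPEC =====
def Spec_allmasks (mask : String) (out : List String) : Prop := out = allmasks_alt mask
instance (mask : String) (out : List String) : Decidable (Spec_allmasks mask out) := by unfold Spec_allmasks; infer_instance

-- ===== CLAIM (what is proved, stated in full; the proofs are below) =====
def Claim_equal_allmasks : Prop := ∀ (mask : String), Dom_allmasks mask → Spec_allmasks mask (allmasks mask)

-- ===== LEMMAS AND PROOFS =====

-- common reference: the n-th expansion, bits of n consumed at the X positions left to right
def buildB : List Char → Nat → List Char
  | [], _ => []
  | c :: rest, n =>
    if c = '0' then 'X' :: buildB rest n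
    else if c = '1' then '1' :: buildB rest n
    else if c = 'X' then (if n % 2 = 1 then '1' else '0') :: buildB rest (n / 2)
    else c :: buildB rest n

-- relative X positions
def xpos : List Char → List Int
  | [] => []
  | c :: rest => if c = 'X' then 0 :: (xpos rest).map (· + 1) else (xpos rest).map (· + 1)

def validMask (cs : List Char) : Prop := ∀ c ∈ cs, c = '0' ∨ c = '1' ∨ c = 'X'

lemma go_invalid (cs : List Char) (h : ¬ validMask cs) : allmasksGo cs = [] := by
  induction cs with
  | nil => exact absurd (by intro c hc; cases hc) h
  | cons c rest ih =>
    by_cases hc : c = '0' ∨ c = '1' ∨ c = 'X'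
    · have hrest : ¬ validMask rest := by
        intro hv
        apply h
        intro x hx
        rcases List.mem_cons.mp hx with rfl | hx'
        · exact hc
        · exact hv x hx'
      simp [allmasksGo, ih hrest]
    · push Not at hc
      simp [allmasksGo, hc.1, hc.2.1, hc.2.2]

lemma flatMap_single {α β : Type} (l : List α) (f : α → β) :
    l.flatMap (fun m => [f m]) = l.map f := by
  induction l with
  | nil => rfl
  | cons x xs ih => simp [List.flatMap_cons, ih]

lemma range_double (M : Nat) :
    List.range (2 * M) = (List.range M).flatMap (fun q => [2 * q, 2 * q + 1]) := by
  induction M with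
  | zero => rfl
  | succ M ih =>
    have h2 : 2 * (M + 1) = (2 * M) + 1 + 1 := by omega
    rw [h2, List.range_succ, List.range_succ, List.range_succ, ih]
    simp

-- A equals the counting enumeration
lemma go_eq_build (cs : List Char) (hv : validMask cs) :
    allmasksGo cs = (List.range (2 ^ (xpos cs).length)).map (buildB cs) := by
  induction cs with
  | nil => simp [allmasksGo, xpos, buildB]
  | cons c rest ih =>
    have hrest : validMask rest := fun x hx => hv x (List.mem_cons_of_mem _ hx)
    have ihr := ih hrest
    rcases hv c List.mem_cons_self with hc | hc | hc
    · subst hc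
      simp only [allmasksGo, ihr, xpos, buildB]
      rw [if_neg (by decide), List.flatMap_map]
      simp [flatMap_single]
    · subst hc
      simp only [allmasksGo, ihr, xpos, buildB]
      rw [if_neg (by decide), List.flatMap_map]
      simp [flatMap_single]
    · subst hc
      have hlen : (xpos ('X' :: rest)).length = (xpos rest).length + 1 := by simp [xpos]
      have hpow : 2 ^ ((xpos rest).length + 1) = 2 * 2 ^ (xpos rest).length := by ring
      rw [allmasksGo, ihr, hlen, hpow, range_double, List.map_flatMap, List.flatMap_map]
      apply List.flatMap_congr  -- pointwise
      intro q _
      have h1 : (2 * q) % 2 = 0 := by omega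
      have h2 : (2 * q) / 2 = q := by omega
      have h3 : (2 * q + 1) % 2 = 1 := by omega
      have h4 : (2 * q + 1) / 2 = q := by omega
      simp [buildB, h1, h2, h3, h4]

-- enumerate bookkeeping
lemma enum_shift {α : Type} (l : List α) (s : Int) :
    PySem.List.enumerate l s = (PySem.List.enumerate l 0).map (fun p => (p.1 + s, p.2)) := by
  induction l generalizing s with
  | nil => simp [PySem.List.enumerate_nil]
  | cons x xs ih =>
    rw [PySem.List.enumerate_cons, PySem.List.enumerate_cons, ih (s + 1), ih (0 + 1)]
    rw [List.map_cons, List.map_map]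
    congr 1
    · simp
    · apply List.map_congr_left
      intro p _
      simp [Prod.ext_iff]
      omega

lemma enum_map_add_one (l : List Int) :
    PySem.List.enumerate (l.map (· + 1)) 0
      = (PySem.List.enumerate l 0).map (fun p => (p.1, p.2 + 1)) := by
  induction l with
  | nil => simp [PySem.List.enumerate_nil]
  | cons x xs ih =>
    rw [List.map_cons, PySem.List.enumerate_cons, PySem.List.enumerate_cons,
      enum_shift (xs.map (· + 1)) (0 + 1), enum_shift xs (0 + 1), ih]
    simp only [List.map_cons, List.map_map]
    rw [List.cons_eq_cons]
    constructor
    · simp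
    · apply List.map_congr_left
      intro p _
      simp

-- the port's xs is xpos
lemma filterMap_enum_eq_xpos (cs : List Char) (s : Int) :
    (PySem.List.enumerate cs s).filterMap (fun p => if p.2 = 'X' then some p.1 else none)
      = (xpos cs).map (· + s) := by
  induction cs generalizing s with
  | nil => simp [PySem.List.enumerate_nil, xpos]
  | cons c rest ih =>
    rw [PySem.List.enumerate_cons, List.filterMap_cons, ih (s + 1)]
    by_cases hc : c = 'X'
    · subst hc
      simp only [xpos, reduceIte, List.map_cons, List.map_map]
      rw [List.cons_eq_cons]
      constructor
      · omega
      · apply List.map_congr_left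
        intro p _
        simp
        omega
    · simp only [xpos, if_neg hc, List.map_map]
      apply List.map_congr_left
      intro p _
      simp
      omega

lemma xpos_nonneg (cs : List Char) : ∀ p ∈ xpos cs, 0 ≤ p := by
  induction cs with
  | nil => simp [xpos]
  | cons c rest ih =>
    intro p hp
    by_cases hc : c = 'X' <;> simp [xpos, hc] at hp
    · rcases hp with h | ⟨q, hq, h⟩
      · omega
      · have := ih q hq; omega
    · rcases hp with ⟨q, hq, h⟩; have := ih q hq; omega

-- shifted single set
lemma pySetD_cons_succ (a : Char) (b : List Char) (p : Int) (hp : 0 ≤ p) (v : Char) :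
    PySem.List.pySetD (a :: b) (p + 1) v = a :: PySem.List.pySetD b p v := by
  obtain ⟨m, rfl⟩ := Int.eq_ofNat_of_zero_le hp
  by_cases hm : m < b.length
  · have h1 : PySem.List.pySet? b (m : Int) v = some (b.set m v) :=
      PySem.List.pySet?_natCast b m v hm
    have h2 : PySem.List.pySet? (a :: b) ((m : Int) + 1) v = some ((a :: b).set (m + 1) v) := by
      have := PySem.List.pySet?_natCast (a :: b) (m + 1) v (by simp; omega)
      simpa [Int.natCast_add] using this
    simp [PySem.List.pySetD, h1, h2, List.set_cons_succ]
  · have h1 : PySem.List.pySet? b (m : Int) v = none := by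
      rw [PySem.List.pySet?_eq_none_iff]
      simp [PySem.Raise.InRange]; omega
    have h2 : PySem.List.pySet? (a :: b) ((m : Int) + 1) v = none := by
      rw [PySem.List.pySet?_eq_none_iff]
      simp [PySem.Raise.InRange]; omega
    simp [PySem.List.pySetD, h1, h2]

-- shifted whole fold
lemma foldl_set_cons (l : List (Int × Int)) (g : Int → Char) (a : Char) (b : List Char)
    (hl : ∀ p ∈ l, 0 ≤ p.2) :
    l.foldl (fun out jp => PySem.List.pySetD out (jp.2 + 1) (g jp.1)) (a :: b)
      = a :: l.foldl (fun out jp => PySem.List.pySetD out jp.2 (g jp.1)) b := by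
  induction l generalizing b with
  | nil => rfl
  | cons x xs ih =>
    simp only [List.foldl_cons]
    rw [pySetD_cons_succ a b x.2 (hl x List.mem_cons_self) (g x.1)]
    exact ih _ (fun p hp => hl p (List.mem_cons_of_mem _ hp))

lemma enum_fst_nonneg (l : List Int) : ∀ p ∈ PySem.List.enumerate l 0, 0 ≤ p.1 := by
  intro p hp
  rw [PySem.List.mem_enumerate_iff] at hp
  obtain ⟨k, hk, rfl⟩ := hp
  simp

lemma enum_snd_mem (l : List Int) : ∀ p ∈ PySem.List.enumerate l 0, p.2 ∈ l := by
  intro p hp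
  rw [PySem.List.mem_enumerate_iff] at hp
  obtain ⟨k, hk, rfl⟩ := hp
  exact List.getElem_mem hk

-- B's inner fold equals buildB
lemma fold_eq_build (cs : List Char) (hv : validMask cs) (n : Nat) :
    (PySem.List.enumerate (xpos cs) 0).foldl
        (fun out jp =>
          PySem.List.pySetD out jp.2 (if (n >>> jp.1.toNat) % 2 = 1 then '1' else '0'))
        (cs.map (fun ch => if ch = '0' then 'X' else ch))
      = buildB cs n := by
  induction cs generalizing n with
  | nil => simp [xpos, PySem.List.enumerate_nil, buildB]
  | cons c rest ih =>
    have hrest : validMask rest := fun x hx => hv x (List.mem_cons_of_mem _ hx)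
    rcases hv c List.mem_cons_self with hc | hc | hc
    · -- c = '0' : head becomes 'X', positions shift by one
      subst hc
      rw [List.map_cons,
        show (if ('0' : Char) = '0' then 'X' else '0') = 'X' from rfl]
      have hx : xpos ('0' :: rest) = (xpos rest).map (· + 1) := by simp [xpos]
      rw [hx, enum_map_add_one, List.foldl_map]
      rw [PySem.List.foldl_congr_mem _ _
        (fun (out : List Char) (jp : Int × Int) => PySem.List.pySetD out (jp.2 + 1)
          (if n >>> jp.1.toNat % 2 = 1 then '1' else '0')) _
        (fun acc p _ => rfl)]
      rw [foldl_set_cons _ (fun j : Int => if n >>> j.toNat % 2 = 1 then '1' else '0') _ _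
        (fun p hp => xpos_nonneg rest _ (enum_snd_mem _ p hp))]
      rw [ih hrest n, buildB]
      simp
    · -- c = '1'
      subst hc
      rw [List.map_cons,
        show (if ('1' : Char) = '0' then 'X' else '1') = '1' from rfl]
      have hx : xpos ('1' :: rest) = (xpos rest).map (· + 1) := by simp [xpos]
      rw [hx, enum_map_add_one, List.foldl_map]
      rw [PySem.List.foldl_congr_mem _ _
        (fun (out : List Char) (jp : Int × Int) => PySem.List.pySetD out (jp.2 + 1)
          (if n >>> jp.1.toNat % 2 = 1 then '1' else '0')) _
        (fun acc p _ => rfl)]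
      rw [foldl_set_cons _ (fun j : Int => if n >>> j.toNat % 2 = 1 then '1' else '0') _ _
        (fun p hp => xpos_nonneg rest _ (enum_snd_mem _ p hp))]
      rw [ih hrest n, buildB]
      simp
    · -- c = 'X' : first step writes bit 0 at position 0, rest uses n / 2
      subst hc
      rw [List.map_cons,
        show (if ('X' : Char) = '0' then 'X' else 'X') = 'X' from rfl]
      have hx : xpos ('X' :: rest) = 0 :: (xpos rest).map (· + 1) := by simp [xpos]
      rw [hx, PySem.List.enumerate_cons]
      simp only [List.foldl_cons, Int.toNat_zero, Nat.shiftRight_zero]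
      have hset : ∀ v : Char,
          PySem.List.pySetD ('X' :: rest.map (fun ch => if ch = '0' then 'X' else ch)) (0 : Int) v
          = v :: rest.map (fun ch => if ch = '0' then 'X' else ch) := by
        intro v
        have h0 : PySem.List.pySet? ('X' :: rest.map (fun ch => if ch = '0' then 'X' else ch))
            ((0 : Nat) : Int) v
            = some (('X' :: rest.map (fun ch => if ch = '0' then 'X' else ch)).set 0 v) :=
          PySem.List.pySet?_natCast _ _ _ (by simp)
        simp only [Int.natCast_zero] at h0
        simp [PySem.List.pySetD, h0]
      rw [hset]
      rw [enum_shift _ (0 + 1), enum_map_add_one, List.map_map, List.foldl_map]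
      have h3 : ∀ k : Nat, n >>> (k + 1) = (n / 2) >>> k := by
        intro k
        rw [Nat.add_comm, Nat.shiftRight_add, Nat.shiftRight_one]
      rw [PySem.List.foldl_congr_mem _ _
        (fun (out : List Char) (jp : Int × Int) => PySem.List.pySetD out (jp.2 + 1)
          (if (n / 2) >>> jp.1.toNat % 2 = 1 then '1' else '0')) _
        (by
          intro acc p hp
          have h1 : 0 ≤ p.1 := enum_fst_nonneg _ p hp
          have h2 : (p.1 + (0 + 1)).toNat = p.1.toNat + 1 := by omega
          show PySem.List.pySetD acc (p.2 + 1)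
              (if n >>> (p.1 + (0 + 1)).toNat % 2 = 1 then '1' else '0') = _
          rw [h2, h3 p.1.toNat])]
      rw [foldl_set_cons _ (fun j : Int => if (n / 2) >>> j.toNat % 2 = 1 then '1' else '0') _ _
        (fun p hp => xpos_nonneg rest _ (enum_snd_mem _ p hp))]
      rw [ih hrest (n / 2), buildB]
      simp

-- ===== VERDICT (by name: the statement is the Claim_ definition above) =====
theorem allmasks_spec : Claim_equal_allmasks := by
  intro mask _
  unfold Spec_allmasks allmasks allmasks_alt
  set cs := mask.toList with hcs
  by_cases hval : validMask cs
  · have hany : cs.any (fun ch => !(ch == '0' || ch == '1' || ch == 'X')) = false := by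
      rw [List.any_eq_false]
      intro x hx
      rcases hval x hx with h | h | h <;> simp [h]
    simp only [hany, Bool.false_eq_true, if_false]
    rw [filterMap_enum_eq_xpos cs 0]
    have hmap0 : (xpos cs).map (· + (0 : Int)) = xpos cs := by simp
    rw [hmap0, go_eq_build cs hval, List.map_map]
    apply List.map_congr_left
    intro n _
    simp only [Function.comp_apply]
    rw [fold_eq_build cs hval n]
  · have hany : cs.any (fun ch => !(ch == '0' || ch == '1' || ch == 'X')) = true := by
      rw [List.any_eq_true]
      unfold validMask at hval
      push Not at hval
      obtain ⟨x, hx, h⟩ := hval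
      refine ⟨x, hx, ?_⟩
      simpa [and_assoc] using h
    simp only [hany]
    simp [go_invalid cs hval]
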